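-- pv_equiv track=rewrite | github.com/bremme/advent-of-code | python/aoc/puzzles/2022/day_3/rucksack_reorganization.py | find_items_in_both_compartments
-- ===== SOURCE A (Python) =====
-- def find_items_in_both_compartments(first_compartment, second_compartment):
--     items_in_both_compartments = []
--
--     for item in first_compartment:
--
--         if item not in second_compartment:
--             continue
--
--         # don't store duplicates
--         if item in items_in_both_compartments:
--             continue
--
--         items_in_both_compartments.append(item)
--
--     return items_in_both_compartments
-- ===== SOURCE B (Python) =====
-- def find_items_in_both_compartments(first_compartment, second_compartment):
--     # distinct items present in both compartments (unordered)
--     common = set(first_compartment) & set(second_compartment)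
--     # recover first-occurrence order by sorting on the first index in compartment 1
--     return sorted(common, key=first_compartment.index)
-- ===== Notes on version B (the rewrite author's own statement) =====
-- stated objective: alternative
-- what changed: A's single interleaved filter+dedup scan with a result-list membership check is replaced by set intersection of the two compartments followed by sorting the distinct common items by their first index in the first compartment, which reconstructs first-occurrence order.
import Mathlib
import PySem

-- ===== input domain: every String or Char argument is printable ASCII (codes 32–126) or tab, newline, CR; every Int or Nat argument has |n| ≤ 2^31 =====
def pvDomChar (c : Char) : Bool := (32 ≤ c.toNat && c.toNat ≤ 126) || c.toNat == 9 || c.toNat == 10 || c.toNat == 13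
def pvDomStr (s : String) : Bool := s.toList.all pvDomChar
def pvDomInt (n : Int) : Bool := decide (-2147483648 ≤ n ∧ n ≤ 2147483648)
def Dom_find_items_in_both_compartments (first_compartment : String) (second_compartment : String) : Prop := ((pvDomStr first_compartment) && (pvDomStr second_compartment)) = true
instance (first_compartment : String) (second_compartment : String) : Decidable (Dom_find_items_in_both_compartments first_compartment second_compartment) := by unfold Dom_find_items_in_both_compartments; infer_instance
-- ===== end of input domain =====

-- B replaces A's interleaved filter+dedup scan by set intersection plus a sort keyed on first index in the first compartment; objective: alternative.


-- ===== PORT A =====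
-- literal port of A's single loop; 'item in second_compartment' is a one-character
-- substring test, which is exactly char membership in the char list.
def find_items_in_both_compartments (first_compartment : String) (second_compartment : String) : List String :=
  first_compartment.toList.foldl
    (fun acc item =>
      if item ∉ second_compartment.toList then acc
      else if String.ofList [item] ∈ acc then acc
      else acc ++ [String.ofList [item]])
    []

-- ===== PORT B =====
-- set(first) & set(second), then sorted(common, key=first_compartment.index);
-- first_compartment.index(item) for a one-character item is exactly the first
-- index of that char in the char list (List.idxOf), as an Int (Python int).
def find_items_in_both_compartments_alt (first_compartment : String) (second_compartment : String) : List String :=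
  (PySem.List.sorted
      (PySem.Set.inter (PySem.Set.ofList first_compartment.toList)
        (PySem.Set.ofList second_compartment.toList))
      (fun c => (List.idxOf c first_compartment.toList : Int))).map
    (fun c => String.ofList [c])

-- ===== PRECONDITION & SPEC =====
def Spec_find_items_in_both_compartments (first_compartment : String) (second_compartment : String) (out : List String) : Prop := out = find_items_in_both_compartments_alt first_compartment second_compartment
instance (first_compartment : String) (second_compartment : String) (out : List String) : Decidable (Spec_find_items_in_both_compartments first_compartment second_compartment out) := by unfold Spec_find_items_in_both_compartments; infer_instance

-- ===== CLAIM (what is proved, stated in full; the proofs are below) =====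
def Claim_equal_find_items_in_both_compartments : Prop := ∀ (first_compartment : String) (second_compartment : String), Dom_find_items_in_both_compartments first_compartment second_compartment → Spec_find_items_in_both_compartments first_compartment second_compartment (find_items_in_both_compartments first_compartment second_compartment)

-- ===== LEMMAS AND PROOFS =====

-- the ordered-dedup fold (first occurrences of l, in order), accumulator exposed
def pvUniqFrom (u : List Char) (l : List Char) : List Char :=
  l.foldl (fun u c => if c ∈ u then u else u ++ [c]) u

theorem pv_mem_map_ofList (c : Char) (x : List Char) :
    String.ofList [c] ∈ x.map (fun d => String.ofList [d]) ↔ c ∈ x := by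
  constructor
  · intro h
    rcases List.mem_map.1 h with ⟨d, hd, hdc⟩
    have := congrArg String.toList hdc
    simp at this
    simpa [this] using hd
  · intro h
    exact List.mem_map.2 ⟨c, h, rfl⟩

-- A's fold computes the membership-filtered ordered dedup, mapped to strings
theorem pv_key (s2 : List Char) (l : List Char) : ∀ u : List Char,
    l.foldl
      (fun acc item =>
        if item ∉ s2 then acc
        else if String.ofList [item] ∈ acc then acc
        else acc ++ [String.ofList [item]])
      ((u.filter (fun c => decide (c ∈ s2))).map (fun c => String.ofList [c]))
    = ((pvUniqFrom u l).filter (fun c => decide (c ∈ s2))).map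
        (fun c => String.ofList [c]) := by
  induction l with
  | nil => intro u; simp [pvUniqFrom]
  | cons c l ih =>
    intro u
    simp only [pvUniqFrom, List.foldl_cons]
    by_cases hu : c ∈ u
    · have hstep : (if c ∈ u then u else u ++ [c]) = u := by simp [hu]
      by_cases hs : c ∈ s2
      · have hmem : String.ofList [c] ∈
            (u.filter (fun c => decide (c ∈ s2))).map (fun c => String.ofList [c]) := by
          rw [pv_mem_map_ofList]
          exact List.mem_filter.2 ⟨hu, by simpa using hs⟩
        rw [hstep, if_neg (by simpa using hs), if_pos hmem]
        exact ih u
      · rw [hstep, if_pos (by simpa using hs)]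
        exact ih u
    · have hstep : (if c ∈ u then u else u ++ [c]) = u ++ [c] := by simp [hu]
      by_cases hs : c ∈ s2
      · have hmem : String.ofList [c] ∉
            (u.filter (fun c => decide (c ∈ s2))).map (fun c => String.ofList [c]) := by
          rw [pv_mem_map_ofList]
          intro hmem
          exact hu (List.mem_filter.1 hmem).1
        have hacc :
            (u.filter (fun c => decide (c ∈ s2))).map (fun c => String.ofList [c])
              ++ [String.ofList [c]]
            = ((u ++ [c]).filter (fun c => decide (c ∈ s2))).map
                (fun c => String.ofList [c]) := by
          simp [List.filter_append, hs]
        rw [hstep, if_neg (by simpa using hs), if_neg hmem, hacc]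
        exact ih (u ++ [c])
      · have hacc :
            (u.filter (fun c => decide (c ∈ s2))).map (fun c => String.ofList [c])
            = ((u ++ [c]).filter (fun c => decide (c ∈ s2))).map
                (fun c => String.ofList [c]) := by
          simp [List.filter_append, hs]
        rw [hstep, if_pos (by simpa using hs), hacc]
        exact ih (u ++ [c])

-- the ordered-dedup fold is exactly PySem.Set.ofList
theorem pv_uniq_eq_ofList (l : List Char) : ∀ u : List Char,
    pvUniqFrom u l = l.foldl PySem.Set.add u := by
  induction l with
  | nil => intro u; simp [pvUniqFrom]
  | cons c l ih =>
    intro u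
    simp only [pvUniqFrom, List.foldl_cons] at *
    have : (if c ∈ u then u else u ++ [c]) = PySem.Set.add u c := by
      simp [PySem.Set.add, PySem.Set.contains]
    rw [this]; exact ih _

-- invariant: the dedup fold over L keeps the accumulator in strictly increasing
-- first-index order relative to L
theorem pv_pairwise (L : List Char) (l : List Char) : ∀ (p u : List Char), L = p ++ l →
    (∀ a ∈ u, a ∈ p) → (∀ a ∈ p, a ∈ u) →
    u.Pairwise (fun a b => List.idxOf a L < List.idxOf b L) →
    (pvUniqFrom u l).Pairwise (fun a b => List.idxOf a L < List.idxOf b L) := by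
  induction l with
  | nil => intro p u _ _ _ h; simpa [pvUniqFrom] using h
  | cons c l ih =>
    intro p u hL hup hpu hpw
    simp only [pvUniqFrom, List.foldl_cons]
    by_cases hu : c ∈ u
    · have hstep : (if c ∈ u then u else u ++ [c]) = u := by simp [hu]
      rw [hstep]
      exact ih (p ++ [c]) u (by simp [hL])
        (fun a ha => by simp [hup a ha])
        (fun a ha => by
          rcases List.mem_append.1 ha with h | h
          · exact hpu a h
          · simp at h; simpa [h] using hu)
        hpw
    · have hstep : (if c ∈ u then u else u ++ [c]) = u ++ [c] := by simp [hu]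
      rw [hstep]
      have hcp : c ∉ p := fun h => hu (hpu c h)
      have hidxc : List.idxOf c L = p.length := by
        rw [hL, List.idxOf_append, if_neg hcp]
        simp
      have hlt : ∀ a ∈ u, List.idxOf a L < List.idxOf c L := by
        intro a ha
        have hap := hup a ha
        rw [hidxc, hL, List.idxOf_append, if_pos hap]
        exact List.idxOf_lt_length_of_mem hap
      refine ih (p ++ [c]) (u ++ [c]) (by simp [hL]) ?_ ?_ ?_
      · intro a ha
        rcases List.mem_append.1 ha with h | h
        · simp [hup a h]
        · simp at h; simp [h]
      · intro a ha
        rcases List.mem_append.1 ha with h | h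
        · simp [hpu a h]
        · simp at h; simp [h]
      · exact List.pairwise_append.2 ⟨hpw, by simp,
          fun a ha b hb => by simp at hb; subst hb; exact hlt a ha⟩

-- ===== VERDICT (by name: the statement is the Claim_ definition above) =====
theorem find_items_in_both_compartments_spec : Claim_equal_find_items_in_both_compartments := by
  intro f s _
  unfold Spec_find_items_in_both_compartments find_items_in_both_compartments
    find_items_in_both_compartments_alt
  have hA := pv_key s.toList f.toList []
  simp only [List.filter_nil, List.map_nil] at hA
  rw [hA]
  -- identify B's set intersection with the filtered ordered dedup
  have hset : PySem.Set.inter (PySem.Set.ofList f.toList) (PySem.Set.ofList s.toList)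
      = (pvUniqFrom [] f.toList).filter (fun c => decide (c ∈ s.toList)) := by
    rw [pv_uniq_eq_ofList]
    unfold PySem.Set.inter
    refine List.filter_congr ?_
    intro c _
    simp [PySem.Set.contains, PySem.Set.mem_ofList]
  rw [hset]
  -- the filtered dedup is already in sorted (first-index) order
  have hpw : ((pvUniqFrom [] f.toList).filter
      (fun c => decide (c ∈ s.toList))).Pairwise
      (fun a b => (List.idxOf a f.toList : Int) ≤ List.idxOf b f.toList) := by
    have := (pv_pairwise f.toList f.toList [] [] rfl (by simp) (by simp)
      (by simp)).filter (fun c => decide (c ∈ s.toList))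
    exact this.imp (fun h => by exact_mod_cast Nat.le_of_lt h)
  rw [PySem.List.sorted_eq_self_of_pairwise _ _ hpw]
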